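-- pv_equiv track=rewrite | github.com/MattnViola/Advent_of_Code_2022_python_solutions | day8/puzzle1.py | d_check
-- ===== SOURCE A (Python) =====
-- def d_check(grid, row, column):
--     # Checking from below
--     b_highest = -1
--     vis = False
--     for i in range(1,len(grid) + 1):
--         x = grid[-i][column]
--         if i + row == len(grid):
--             if grid[row][column] > b_highest:
--                 vis = True
--                 break
--             else:
--                 break
--         if x > b_highest:
--             b_highest = x
--     return vis
-- ===== SOURCE B (Python) =====
-- def d_check(grid, row, column):
--     # Visible from below <=> strictly taller than every tree below it in the column.
--     # A tree addressed outside rows 0..len(grid)-1 is never reported visible.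
--     if not (0 <= row < len(grid)):
--         return False
--     h = grid[row][column]
--     return all(grid[r][column] < h for r in range(row + 1, len(grid)))
-- ===== Notes on version B (the rewrite author's own statement) =====
-- stated objective: idiomatic
-- what changed: Replaces the bottom-up running-max scan with -1 sentinel, break flag and i+row==len(grid) index arithmetic by a range guard plus a short-circuiting all() that compares each tree below the target directly against it, never computing a column maximum.
-- intended difference: On inputs with 0 <= row < len(grid) where grid[row][column] <= -1 and every tree strictly below it in the column is strictly shorter, A's -1 sentinel makes it return False although the tree towers over everything below; B returns True, the intended visibility answer (the sentinel silently assumes the nonnegative digit heights of the puzzle). — e.g. on d_check([[-2]], 0, 0): A returns false, B returns true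
import Mathlib
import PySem

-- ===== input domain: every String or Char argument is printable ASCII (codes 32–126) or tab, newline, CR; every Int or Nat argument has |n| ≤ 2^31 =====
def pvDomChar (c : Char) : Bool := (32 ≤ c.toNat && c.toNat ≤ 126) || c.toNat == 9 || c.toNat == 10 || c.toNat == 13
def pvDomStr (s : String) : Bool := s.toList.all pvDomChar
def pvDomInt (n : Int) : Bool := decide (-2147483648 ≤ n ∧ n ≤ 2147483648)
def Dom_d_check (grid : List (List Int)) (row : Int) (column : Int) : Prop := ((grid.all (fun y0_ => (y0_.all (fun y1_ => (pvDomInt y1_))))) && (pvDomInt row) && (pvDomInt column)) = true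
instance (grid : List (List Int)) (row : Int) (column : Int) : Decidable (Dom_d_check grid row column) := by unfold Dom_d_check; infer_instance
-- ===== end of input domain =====

-- B replaces A's bottom-up running-max loop (break flag, -1 sentinel, i+row==len(grid)
-- index arithmetic) by a range guard plus a short-circuiting all() comparing each lower
-- tree directly against the target; on negative target heights with nothing taller below,
-- A's sentinel returns False while B returns the intended True (see D_ below).


-- ===== PORT A =====
-- shared helper for the Python expression grid[r][column] (none = IndexError)
def colAt (grid : List (List Int)) (column : Int) (r : Int) : Option Int :=
  (PySem.List.pyGet? grid r).bind (fun l => PySem.List.pyGet? l column)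

-- A's for-loop over i in range(1, len(grid)+1) with the running max b_highest.
def dCheckGo (grid : List (List Int)) (row : Int) (column : Int) : List Int → Int → Bool
  | [], _ => false
  | i :: rest, bh =>
    match colAt grid column (-i) with
    | none => false                                   -- IndexError on grid[-i][column]
    | some x =>
      if i + row = (grid.length : Int) then
        match colAt grid column row with
        | none => false                               -- IndexError on grid[row][column]
        | some h => decide (h > bh)                   -- vis = True / break, else break with vis = False
      else dCheckGo grid row column rest (if x > bh then x else bh)

def d_check (grid : List (List Int)) (row : Int) (column : Int) : Bool :=
  dCheckGo grid row column (PySem.List.pyRange 1 ((grid.length : Int) + 1) 1) (-1)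

-- ===== PORT B =====
def d_check_alt (grid : List (List Int)) (row : Int) (column : Int) : Bool :=
  if 0 ≤ row ∧ row < (grid.length : Int) then
    let h := (colAt grid column row).getD 0           -- getD unreached: Pre_ makes grid[row][column] defined
    (PySem.List.pyRange (row + 1) (grid.length : Int) 1).all
      (fun r => decide ((colAt grid column r).getD 0 < h))
  else false

-- ===== PRECONDITION & SPEC =====
-- Pre_ excludes exactly the inputs where A raises IndexError: a column index out of range for
-- some row A's scan reads (rows row..len-1 when 0 ≤ row < len, every row otherwise).
def Pre_d_check (grid : List (List Int)) (row : Int) (column : Int) : Prop :=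
  ∀ l ∈ grid.drop (if 0 ≤ row ∧ row < (grid.length : Int) then row.toNat else 0),
    -(l.length : Int) ≤ column ∧ column < (l.length : Int)
instance (grid : List (List Int)) (row : Int) (column : Int) : Decidable (Pre_d_check grid row column) := by unfold Pre_d_check; infer_instance

def pvWitness_d_check : List (List Int) × Int × Int := ([[5], [3]], 0, 0)

-- On inputs with 0 ≤ row < len(grid) where grid[row][column] ≤ -1 and every tree strictly
-- below it in the column is strictly shorter, A's -1 sentinel makes it return False although
-- the tree towers over everything below; B returns True, the intended visibility answer
-- (the sentinel silently assumes the nonnegative digit heights of the puzzle).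
-- (column % len normalises Python's negative column index; getD's default is unreached inside Pre_.)
def D_d_check (grid : List (List Int)) (row : Int) (column : Int) : Prop :=
  let v := (grid.drop row.toNat).map (fun l => l.getD ((column % (l.length : Int)).toNat) 0)
  0 ≤ row ∧ v.headI < 0 ∧ ∀ y ∈ v.tail, y < v.headI
instance (grid : List (List Int)) (row : Int) (column : Int) : Decidable (D_d_check grid row column) := by unfold D_d_check; infer_instance

def Spec_d_check (grid : List (List Int)) (row : Int) (column : Int) (out : Bool) : Prop :=
  ¬ D_d_check grid row column → out = d_check_alt grid row column
instance (grid : List (List Int)) (row : Int) (column : Int) (out : Bool) : Decidable (Spec_d_check grid row column out) := by unfold Spec_d_check; infer_instance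

def pvDiffWitness_d_check : List (List Int) × Int × Int := ([[-2]], 0, 0)
def pvDiffWitnessOut_d_check : Bool × Bool := (false, true)

-- ===== CLAIM (what is proved, stated in full; the proofs are below) =====
def Claim_unchanged_d_check : Prop := ∀ (grid : List (List Int)) (row : Int) (column : Int), Dom_d_check grid row column → Pre_d_check grid row column → Spec_d_check grid row column (d_check grid row column)
def Claim_changed_d_check : Prop := Dom_d_check (pvDiffWitness_d_check.1) (pvDiffWitness_d_check.2.1) (pvDiffWitness_d_check.2.2) ∧ Pre_d_check (pvDiffWitness_d_check.1) (pvDiffWitness_d_check.2.1) (pvDiffWitness_d_check.2.2) ∧ D_d_check (pvDiffWitness_d_check.1) (pvDiffWitness_d_check.2.1) (pvDiffWitness_d_check.2.2) ∧ d_check (pvDiffWitness_d_check.1) (pvDiffWitness_d_check.2.1) (pvDiffWitness_d_check.2.2) = pvDiffWitnessOut_d_check.1 ∧ d_check_alt (pvDiffWitness_d_check.1) (pvDiffWitness_d_check.2.1) (pvDiffWitness_d_check.2.2) = pvDiffWitnessOut_d_check.2 ∧ pvDiffWitnessOut_d_check.1 ≠ pvDiffWitnessOut_d_check.2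
def Claim_exact_d_check : Prop := ∀ (grid : List (List Int)) (row : Int) (column : Int), Dom_d_check grid row column → Pre_d_check grid row column → D_d_check grid row column → d_check grid row column ≠ d_check_alt grid row column

-- ===== LEMMAS AND PROOFS =====

theorem upd_eq_max (b x : Int) : (if b < x then x else b) = max b x := by
  rcases lt_or_ge b x with h | h
  · simp [h, max_eq_right h.le]
  · simp [not_lt.mpr h, max_eq_left h]

theorem foldl_max_out (l : List Int) : ∀ (a x : Int),
    l.foldl max (max a x) = max (l.foldl max a) x := by
  induction l with
  | nil => intro a x; rfl
  | cons y t ih =>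
    intro a x
    simp only [List.foldl_cons]
    rw [max_right_comm a x y, ih]

theorem foldl_max_reverse (l : List Int) : ∀ (a : Int),
    l.reverse.foldl max a = l.foldl max a := by
  induction l with
  | nil => intro a; rfl
  | cons x t ih =>
    intro a
    simp only [List.reverse_cons, List.foldl_append, List.foldl_cons, List.foldl_nil]
    rw [ih, ← foldl_max_out]

-- h beats the running max iff it beats the seed and every element
theorem gt_foldl_max (l : List Int) : ∀ (a h : Int),
    (l.foldl max a < h) ↔ (a < h ∧ ∀ x ∈ l, x < h) := by
  induction l with
  | nil => intro a h; simp
  | cons y t ih =>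
    intro a h
    simp only [List.foldl_cons, ih, max_lt_iff, List.mem_cons]
    constructor
    · rintro ⟨⟨ha, hy⟩, ht⟩
      exact ⟨ha, fun x hx => hx.elim (fun e => e ▸ hy) (ht x)⟩
    · rintro ⟨ha, hall⟩
      exact ⟨⟨ha, hall y (Or.inl rfl)⟩, fun x hx => hall x (Or.inr hx)⟩

-- shifting a negative grid index into range
theorem colAt_shift (grid : List (List Int)) (column : Int) (r : Int)
    (h0 : -(grid.length : Int) ≤ r) (h1 : r < 0) :
    colAt grid column r = colAt grid column (r + grid.length) := by
  have key : PySem.List.pyGet? grid r = PySem.List.pyGet? grid (r + grid.length) := by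
    have h2 := PySem.List.pyGet?_neg_natCast grid (-r).toNat (by omega) (by omega)
    rw [show (-(((-r).toNat : Nat) : Int)) = r by omega] at h2
    rw [h2, PySem.List.pyGet?_of_nonneg grid (by omega)]
    congr 1
    omega
  unfold colAt
  rw [key]

-- Python l[c] as a getD with the index normalised by % (valid possibly-negative c)
theorem pyGet?_cell (l : List Int) (c : Int)
    (h1 : -(l.length : Int) ≤ c) (h2 : c < (l.length : Int)) :
    PySem.List.pyGet? l c = some (l.getD ((c % (l.length : Int)).toNat) 0) := by
  by_cases hc0 : c < 0
  · have he : c % (l.length : Int) = c + l.length := by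
      have h4 : (c + l.length) % (l.length : Int) = c % l.length := by simp
      rw [← h4]
      exact Int.emod_eq_of_lt (by omega) (by omega)
    have key : PySem.List.pyGet? l c = PySem.List.pyGet? l (c + l.length) := by
      have h3 := PySem.List.pyGet?_neg_natCast l (-c).toNat (by omega) (by omega)
      rw [show (-(((-c).toNat : Nat) : Int)) = c by omega] at h3
      rw [h3, PySem.List.pyGet?_of_nonneg l (by omega)]
      congr 1
      omega
    rw [key, PySem.List.pyGet?_of_nonneg l (by omega),
        List.getElem?_eq_getElem (by omega : (c + l.length).toNat < l.length),
        he, List.getD_eq_getElem _ _ (by omega)]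
  · have he : c % (l.length : Int) = c := Int.emod_eq_of_lt (by omega) h2
    rw [PySem.List.pyGet?_of_nonneg l (by omega),
        List.getElem?_eq_getElem (by omega : c.toNat < l.length),
        he, List.getD_eq_getElem _ _ (by omega)]

-- under Pre_, grid[r][column] is that getD of row r, for every row r that A's scan reads
theorem pre_cell (grid : List (List Int)) (row column : Int)
    (hpre : Pre_d_check grid row column) (r : Int)
    (hr0 : 0 ≤ r) (hrn : r < (grid.length : Int))
    (hge : 0 ≤ row → row < (grid.length : Int) → row ≤ r) :
    colAt grid column r = some ((fun l => l.getD ((column % (l.length : Int)).toNat) 0)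
      (grid.getD r.toNat [])) := by
  have hlt : r.toNat < grid.length := by omega
  have hmem : grid[r.toNat] ∈
      grid.drop (if 0 ≤ row ∧ row < (grid.length : Int) then row.toNat else 0) := by
    set s := if 0 ≤ row ∧ row < (grid.length : Int) then row.toNat else 0 with hs
    have hsle : s ≤ r.toNat := by
      by_cases h : 0 ≤ row ∧ row < (grid.length : Int)
      · have := hge h.1 h.2
        simp only [hs, if_pos h]
        omega
      · simp [hs, if_neg h]
    have : (grid.drop s)[r.toNat - s]'(by simp; omega) = grid[r.toNat] := by
      rw [List.getElem_drop]
      congr 1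
      omega
    rw [← this]
    exact List.getElem_mem _
  obtain ⟨hc1, hc2⟩ := hpre _ hmem
  unfold colAt
  rw [PySem.List.pyGet?_of_nonneg grid hr0, List.getElem?_eq_getElem hlt]
  simp only [Option.bind_some]
  rw [List.getD_eq_getElem _ _ hlt]
  exact pyGet?_cell _ _ hc1 hc2

theorem pre_colAt (grid : List (List Int)) (row column : Int)
    (hpre : Pre_d_check grid row column) (r : Int)
    (hr0 : 0 ≤ r) (hrn : r < (grid.length : Int))
    (hge : 0 ≤ row → row < (grid.length : Int) → row ≤ r) :
    ∃ v, colAt grid column r = some v :=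
  ⟨_, pre_cell grid row column hpre r hr0 hrn hge⟩

-- A's loop, 0 ≤ row < len case: running state after scanning rows len-1 … len-k+1 (bottom up)
theorem loopA_nonneg (grid : List (List Int)) (row column : Int)
    (hpre : Pre_d_check grid row column) (h0 : 0 ≤ row) :
    ∀ (m : Nat) (k bh : Int), 1 ≤ k → k + m = (grid.length : Int) - row →
    dCheckGo grid row column (PySem.List.pyRange k ((grid.length : Int) + 1) 1) bh
      = decide ((colAt grid column row).getD (-1) >
          ((PySem.List.pyRange ((grid.length : Int) - k) row (-1)).map
            (fun r => (colAt grid column r).getD (-1))).foldl max bh) := by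
  intro m
  induction m with
  | zero =>
    intro k bh hk1 hk2
    have hrow : ∃ h, colAt grid column row = some h :=
      pre_colAt grid row column hpre row h0 (by omega) (fun _ _ => le_rfl)
    obtain ⟨h, hh⟩ := hrow
    have hneg : colAt grid column (-k) = some h := by
      rw [show (-k) = (row - (grid.length:Int)) by omega,
          colAt_shift grid column _ (by omega) (by omega),
          show (row - (grid.length:Int) + grid.length) = row by ring, hh]
    rw [PySem.List.pyRange_one_cons (by omega)]
    unfold dCheckGo
    rw [hneg]
    simp only [if_pos (by omega : k + row = (grid.length : Int)), hh]
    rw [show (grid.length : Int) - k = row by omega,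
        PySem.List.pyRange_neg_one_eq_nil le_rfl]
    simp
  | succ m ih =>
    intro k bh hk1 hk2
    have hklt : k < (grid.length : Int) - row := by omega
    have hx : ∃ x, colAt grid column ((grid.length : Int) - k) = some x :=
      pre_colAt grid row column hpre _ (by omega) (by omega) (fun _ _ => by omega)
    obtain ⟨x, hx⟩ := hx
    have hneg : colAt grid column (-k) = some x := by
      rw [show (-k) = ((grid.length : Int) - k - grid.length) by ring,
          colAt_shift grid column _ (by omega) (by omega),
          show ((grid.length : Int) - k - grid.length + grid.length) = (grid.length : Int) - k by ring, hx]
    rw [PySem.List.pyRange_one_cons (by omega)]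
    unfold dCheckGo
    rw [hneg]
    simp only [if_neg (by omega : ¬ (k + row = (grid.length : Int)))]
    rw [ih (k + 1) (if x > bh then x else bh) (by omega) (by omega)]
    rw [PySem.List.pyRange_neg_one_cons (by omega : row < (grid.length : Int) - k)]
    simp only [List.map_cons, List.foldl_cons, hx, Option.getD_some]
    rw [show (grid.length : Int) - (k + 1) = (grid.length : Int) - k - 1 by ring]
    rw [upd_eq_max]

-- A's loop when row is outside [0, len): the break condition i + row == len(grid) never fires
theorem loopA_nobreak (grid : List (List Int)) (row column : Int)
    (hpre : Pre_d_check grid row column)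
    (hc : ¬ (0 ≤ row ∧ row < (grid.length : Int))) :
    ∀ (m : Nat) (k bh : Int), 1 ≤ k → k + m = (grid.length : Int) + 1 →
    dCheckGo grid row column (PySem.List.pyRange k ((grid.length : Int) + 1) 1) bh = false := by
  intro m
  induction m with
  | zero =>
    intro k bh hk1 hk2
    rw [PySem.List.pyRange_one_eq_nil (by omega)]
    rfl
  | succ m ih =>
    intro k bh hk1 hk2
    have hx : ∃ x, colAt grid column ((grid.length : Int) - k) = some x :=
      pre_colAt grid row column hpre _ (by omega) (by omega)
        (fun h1 h2 => absurd ⟨h1, h2⟩ hc)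
    obtain ⟨x, hx⟩ := hx
    have hneg : colAt grid column (-k) = some x := by
      rw [show (-k) = ((grid.length : Int) - k - grid.length) by ring,
          colAt_shift grid column _ (by omega) (by omega),
          show ((grid.length : Int) - k - grid.length + grid.length) = (grid.length : Int) - k by ring, hx]
    rw [PySem.List.pyRange_one_cons (by omega)]
    unfold dCheckGo
    rw [hneg]
    simp only [if_neg (by omega : ¬ (k + row = (grid.length : Int)))]
    exact ih (k + 1) _ (by omega) (by omega)

-- A's whole function, in-range case: visible iff h beats -1 and every tree below
theorem dcheck_iff (grid : List (List Int)) (row column : Int)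
    (hpre : Pre_d_check grid row column) (hc : 0 ≤ row ∧ row < (grid.length : Int))
    (h : Int) (hh : colAt grid column row = some h) :
    (d_check grid row column = true)
      ↔ ((-1 : Int) < h ∧ ∀ r ∈ PySem.List.pyRange (row + 1) (grid.length : Int) 1,
          (colAt grid column r).getD (-1) < h) := by
  obtain ⟨h0, hp2⟩ := hc
  unfold d_check
  rw [loopA_nonneg grid row column hpre h0 ((grid.length : Int) - row - 1).toNat 1 (-1)
      (le_refl 1) (by omega)]
  have hfold : ((PySem.List.pyRange ((grid.length : Int) - 1) row (-1)).map
        (fun r => (colAt grid column r).getD (-1))).foldl max (-1)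
      = List.foldl max (-1) ((PySem.List.pyRange (row + 1) (grid.length : Int) 1).map
        (fun r => (colAt grid column r).getD (-1))) := by
    rw [PySem.List.pyRange_neg_one_eq_reverse,
        show (grid.length : Int) - 1 + 1 = (grid.length : Int) by ring,
        List.map_reverse, foldl_max_reverse]
  simp only [hh, Option.getD_some, hfold, decide_eq_true_eq, gt_iff_lt]
  rw [gt_foldl_max]
  simp only [List.forall_mem_map]

-- B's whole function, in-range case
theorem dcheck_alt_iff (grid : List (List Int)) (row column : Int)
    (hc : 0 ≤ row ∧ row < (grid.length : Int))
    (h : Int) (hh : colAt grid column row = some h) :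
    (d_check_alt grid row column = true)
      ↔ (∀ r ∈ PySem.List.pyRange (row + 1) (grid.length : Int) 1,
          (colAt grid column r).getD 0 < h) := by
  unfold d_check_alt
  rw [if_pos hc]
  simp only [hh, Option.getD_some, List.all_eq_true, decide_eq_true_eq]

-- below row, getD's default never matters: colAt is some under Pre_
theorem colAt_below_some (grid : List (List Int)) (row column : Int)
    (hpre : Pre_d_check grid row column) (hc : 0 ≤ row ∧ row < (grid.length : Int)) :
    ∀ r ∈ PySem.List.pyRange (row + 1) (grid.length : Int) 1,
      ∃ v, colAt grid column r = some v := by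
  intro r hr
  rw [PySem.List.mem_pyRange_one] at hr
  exact pre_colAt grid row column hpre r (by omega) (by omega) (fun _ _ => by omega)

-- the two getD defaults agree below row under Pre_
theorem below_getD_agree (grid : List (List Int)) (row column : Int)
    (hpre : Pre_d_check grid row column) (hc : 0 ≤ row ∧ row < (grid.length : Int)) (h : Int) :
    (∀ r ∈ PySem.List.pyRange (row + 1) (grid.length : Int) 1,
        (colAt grid column r).getD (-1) < h)
      ↔ (∀ r ∈ PySem.List.pyRange (row + 1) (grid.length : Int) 1,
        (colAt grid column r).getD 0 < h) := by
  constructor <;> intro hall r hr <;>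
    obtain ⟨v, hv⟩ := colAt_below_some grid row column hpre hc r hr <;>
    have := hall r hr <;> rw [hv] at this ⊢ <;> simpa using this

-- D_ in terms of the ports' column reads, inside Pre_
theorem D_iff (grid : List (List Int)) (row column : Int)
    (hpre : Pre_d_check grid row column) (hc : 0 ≤ row ∧ row < (grid.length : Int))
    (h : Int) (hh : colAt grid column row = some h) :
    D_d_check grid row column
      ↔ (h ≤ -1 ∧ ∀ r ∈ PySem.List.pyRange (row + 1) (grid.length : Int) 1,
          (colAt grid column r).getD 0 < h) := by
  have hrowlt : row.toNat < grid.length := by omega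
  have hcellrow : grid[row.toNat].getD ((column % ((grid[row.toNat].length : Nat) : Int)).toNat) 0 = h := by
    have hpc := pre_cell grid row column hpre row hc.1 hc.2 (fun _ _ => le_rfl)
    rw [hh, List.getD_eq_getElem _ _ hrowlt] at hpc
    exact (Option.some_injective _ hpc).symm
  have hdropc : grid.drop row.toNat = grid[row.toNat] :: grid.drop (row.toNat + 1) :=
    List.drop_eq_getElem_cons hrowlt
  have hb : (∀ l ∈ grid.drop (row.toNat + 1),
        l.getD ((column % ((l.length : Nat) : Int)).toNat) 0 < h)
      ↔ (∀ r ∈ PySem.List.pyRange (row + 1) (grid.length : Int) 1,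
          (colAt grid column r).getD 0 < h) := by
    constructor
    · intro hall r hr
      rw [PySem.List.mem_pyRange_one] at hr
      have hrlt : r.toNat < grid.length := by omega
      have hcell := pre_cell grid row column hpre r (by omega) (by omega) (fun _ _ => by omega)
      rw [hcell]
      simp only [Option.getD_some]
      rw [List.getD_eq_getElem _ _ hrlt]
      apply hall
      have hgd : (grid.drop (row.toNat + 1))[r.toNat - (row.toNat + 1)]'(by simp; omega)
          = grid[r.toNat] := by
        rw [List.getElem_drop]
        congr 1
        omega
      rw [← hgd]
      exact List.getElem_mem _
    · intro hall l hl
      obtain ⟨k, hk, hkl⟩ := List.mem_iff_getElem.mp hl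
      have hklen : row.toNat + 1 + k < grid.length := by
        simp only [List.length_drop] at hk
        omega
      have hlg : l = grid[row.toNat + 1 + k] := by
        rw [← hkl, List.getElem_drop]
      have hr := hall ((row.toNat + 1 + k : Nat) : Int)
        (by rw [PySem.List.mem_pyRange_one]; push_cast; omega)
      have hcell := pre_cell grid row column hpre ((row.toNat + 1 + k : Nat) : Int)
        (by positivity) (by push_cast; omega) (fun _ _ => by push_cast; omega)
      rw [hcell] at hr
      simp only [Option.getD_some, Int.toNat_natCast] at hr
      rw [List.getD_eq_getElem _ _ hklen] at hr
      rw [hlg]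
      exact hr
  unfold D_d_check
  rw [hdropc]
  simp only [List.map_cons, List.headI_cons, List.tail_cons, List.forall_mem_map, hcellrow]
  rw [hb]
  exact ⟨fun x => ⟨by omega, x.2.2⟩, fun x => ⟨hc.1, by omega, x.2⟩⟩

-- ===== VERDICT (by name: the statements are the Claim_ definitions above) =====
theorem d_check_spec : Claim_unchanged_d_check := by
  intro grid row column _ hpre
  unfold Spec_d_check
  intro hnd
  by_cases hc : 0 ≤ row ∧ row < (grid.length : Int)
  · obtain ⟨h, hh⟩ := pre_colAt grid row column hpre row hc.1 hc.2 (fun _ _ => le_rfl)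
    rw [D_iff grid row column hpre hc h hh] at hnd
    rw [Bool.eq_iff_iff, dcheck_iff grid row column hpre hc h hh,
        dcheck_alt_iff grid row column hc h hh,
        ← below_getD_agree grid row column hpre hc h]
    constructor
    · exact fun hp => hp.2
    · intro hp
      refine ⟨?_, hp⟩
      by_contra hneg
      exact hnd ⟨by omega, (below_getD_agree grid row column hpre hc h).mp hp⟩
  · unfold d_check d_check_alt
    rw [loopA_nobreak grid row column hpre hc (grid.length : Nat) 1 (-1) le_rfl (by omega),
        if_neg hc]

theorem d_check_changed : Claim_changed_d_check := by
  unfold Claim_changed_d_check; decide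

theorem d_check_tight : Claim_exact_d_check := by
  intro grid row column _ hpre hD
  have hD' := hD
  unfold D_d_check at hD'
  obtain ⟨h0, hhd, -⟩ := hD'
  have hrl : row.toNat < grid.length := by
    by_contra hn
    rw [List.drop_eq_nil_of_le (by omega), List.map_nil] at hhd
    simp [List.headI] at hhd
  have hc : 0 ≤ row ∧ row < (grid.length : Int) := ⟨h0, by omega⟩
  obtain ⟨h, hh⟩ := pre_colAt grid row column hpre row hc.1 hc.2 (fun _ _ => le_rfl)
  rw [D_iff grid row column hpre hc h hh] at hD
  have hle := hD.1
  have hA : d_check grid row column = false := by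
    rw [← Bool.not_eq_true, dcheck_iff grid row column hpre hc h hh]
    rintro ⟨hgt, -⟩
    omega
  have hB : d_check_alt grid row column = true := by
    rw [dcheck_alt_iff grid row column hc h hh]
    exact hD.2
  rw [hA, hB]
  simp
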